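-- pv_equiv track=rewrite | github.com/Exaecut/vekl | gen_swizzle.py | format_flat_macro
-- ===== SOURCE A (Python) =====
-- from itertools import product
--
-- def swizzles(rank, components):
--     """Generate all rank-length swizzles from [(name, index), ...]."""
--     results = []
--     for combo in product(components, repeat=rank):
--         name = "".join(c[0] for c in combo)
--         indices = [c[1] for c in combo]
--         padded = indices + [0] * (4 - rank)
--         results.append((name, padded))
--     return results
--
-- def format_flat_macro(rank, components_list, comp_name):
--     """Format a flat enumeration macro."""
--     combos = swizzles(rank, components_list)
--     comp_upper = comp_name.upper()
--     macro_name = f"VEKL_SWIZZLE{rank}_{comp_upper}"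
--     entries = []
--     for name, idx in combos:
--         entries.append(f"X({rank},L,{name},{idx[0]},{idx[1]},{idx[2]},{idx[3]})")
--     body = " ".join(entries)
--     return f"#define {macro_name}(X, L) {body}"
-- ===== SOURCE B (Python) =====
-- def format_flat_macro(rank, components_list, comp_name):
--     """Format a flat enumeration macro (single-loop base-b decoding, no itertools)."""
--     base = len(components_list)
--     entries = []
--     for i in range(base ** rank):
--         name = ""
--         idx = [0] * max(rank, 4)
--         x = i
--         for p in range(rank - 1, -1, -1):
--             cname, cidx = components_list[x % base]
--             x //= base
--             name = cname + name
--             idx[p] = cidx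
--         entries.append(f"X({rank},L,{name},{idx[0]},{idx[1]},{idx[2]},{idx[3]})")
--     return f"#define VEKL_SWIZZLE{rank}_{comp_name.upper()}(X, L) {' '.join(entries)}"
-- ===== Notes on version B (the rewrite author's own statement) =====
-- stated objective: alternative
-- what changed: Replaces itertools.product and the separate swizzles helper building combo tuples with a single loop over range(base**rank) that decodes each index into base-b digits (last position fastest) and formats the entry inline.
import Mathlib
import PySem

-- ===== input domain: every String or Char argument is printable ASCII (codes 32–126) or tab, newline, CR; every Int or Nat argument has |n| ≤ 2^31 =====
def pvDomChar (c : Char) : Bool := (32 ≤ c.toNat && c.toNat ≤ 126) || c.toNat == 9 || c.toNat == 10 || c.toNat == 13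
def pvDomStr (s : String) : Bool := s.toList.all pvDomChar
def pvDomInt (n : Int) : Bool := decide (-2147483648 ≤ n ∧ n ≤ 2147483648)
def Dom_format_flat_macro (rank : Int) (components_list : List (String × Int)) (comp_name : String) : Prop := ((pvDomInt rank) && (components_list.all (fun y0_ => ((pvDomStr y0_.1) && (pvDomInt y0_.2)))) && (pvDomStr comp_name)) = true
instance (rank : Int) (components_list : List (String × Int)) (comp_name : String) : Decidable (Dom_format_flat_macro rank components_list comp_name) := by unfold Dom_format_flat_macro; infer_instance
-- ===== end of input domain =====

-- B replaces itertools.product and the swizzles helper with one loop over range(base**rank)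
-- that base-b decodes each index into a swizzle entry inline (alternative decomposition, same cost).


-- ===== PORT A =====
-- itertools.product(components, repeat=rank): first component varies slowest, last fastest.
def pvProdRep (cs : List (String × Int)) : Nat → List (List (String × Int))
  | 0 => [[]]
  | n + 1 => cs.flatMap (fun c => (pvProdRep cs n).map (fun t => c :: t))

-- swizzles(rank, components): rank < 0 makes Python's product raise (excluded by Pre_), so toNat is unreachable there.
def pvSwizzles (rank : Int) (components : List (String × Int)) : List (String × List Int) :=
  (pvProdRep components rank.toNat).foldl
    (fun results combo =>
      results ++ [(PySem.Str.join "" (combo.map Prod.fst),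
                   combo.map Prod.snd ++ List.replicate ((4 - rank).toNat) 0)]) []

def format_flat_macro (rank : Int) (components_list : List (String × Int)) (comp_name : String) : String :=
  let combos := pvSwizzles rank components_list
  let comp_upper := PySem.Str.upper comp_name
  let macro_name := "VEKL_SWIZZLE" ++ PySem.Int.toStr rank ++ "_" ++ comp_upper
  -- idx[0..3]: always in range inside Pre_ (the padded list has length ≥ 4), so pyGetD = Python indexing here
  let entries := combos.foldl
    (fun entries p =>
      entries ++ ["X(" ++ PySem.Int.toStr rank ++ ",L," ++ p.1 ++ ","
        ++ PySem.Int.toStr (PySem.List.pyGetD p.2 0 0) ++ ","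
        ++ PySem.Int.toStr (PySem.List.pyGetD p.2 1 0) ++ ","
        ++ PySem.Int.toStr (PySem.List.pyGetD p.2 2 0) ++ ","
        ++ PySem.Int.toStr (PySem.List.pyGetD p.2 3 0) ++ ")"]) []
  let body := PySem.Str.join " " entries
  "#define " ++ macro_name ++ "(X, L) " ++ body

-- ===== PORT B =====
-- inner loop 'for p in range(rank-1, -1, -1)': first iteration handles the LAST position (d = x % base),
-- each later iteration prepends; rendered as structural recursion on the number of remaining positions.
def pvDecode (cs : List (String × Int)) (b : Nat) : Nat → Nat → String × List Int
  | 0, _ => ("", [])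
  | n + 1, x =>
      let c := cs.getD (x % b) ("", 0)   -- components_list[x % base]: in range since 0 ≤ x % b < b
      let prev := pvDecode cs b n (x / b)
      (prev.1 ++ c.1, prev.2 ++ [c.2])

def format_flat_macro_alt (rank : Int) (components_list : List (String × Int)) (comp_name : String) : String :=
  let b := components_list.length
  let n := rank.toNat                    -- rank < 0 raises in Python B too (excluded by Pre_)
  let entries := (List.range (b ^ n)).foldl
    (fun entries i =>
      let nm_ids := pvDecode components_list b n i
      -- idx = [0]*max(rank,4) with positions rank-1..0 written: written part ++ untouched zero tail
      let idx := nm_ids.2 ++ List.replicate (max n 4 - n) 0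
      entries ++ ["X(" ++ PySem.Int.toStr rank ++ ",L," ++ nm_ids.1 ++ ","
        ++ PySem.Int.toStr (PySem.List.pyGetD idx 0 0) ++ ","
        ++ PySem.Int.toStr (PySem.List.pyGetD idx 1 0) ++ ","
        ++ PySem.Int.toStr (PySem.List.pyGetD idx 2 0) ++ ","
        ++ PySem.Int.toStr (PySem.List.pyGetD idx 3 0) ++ ")"]) []
  "#define VEKL_SWIZZLE" ++ PySem.Int.toStr rank ++ "_" ++ PySem.Str.upper comp_name
    ++ "(X, L) " ++ PySem.Str.join " " entries

-- ===== PRECONDITION & SPEC =====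
-- Pre_ excludes only rank < 0, where Python A raises (itertools.product rejects a negative repeat).
def Pre_format_flat_macro (rank : Int) (components_list : List (String × Int)) (comp_name : String) : Prop := 0 ≤ rank
instance (rank : Int) (components_list : List (String × Int)) (comp_name : String) : Decidable (Pre_format_flat_macro rank components_list comp_name) := by unfold Pre_format_flat_macro; infer_instance
def pvWitness_format_flat_macro : Int × (List (String × Int)) × String := (2, [("x", 0), ("y", 1)], "vec")

def Spec_format_flat_macro (rank : Int) (components_list : List (String × Int)) (comp_name : String) (out : String) : Prop := out = format_flat_macro_alt rank components_list comp_name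
instance (rank : Int) (components_list : List (String × Int)) (comp_name : String) (out : String) : Decidable (Spec_format_flat_macro rank components_list comp_name out) := by unfold Spec_format_flat_macro; infer_instance

-- ===== CLAIM (what is proved, stated in full; the proofs are below) =====
def Claim_equal_format_flat_macro : Prop := ∀ (rank : Int) (components_list : List (String × Int)) (comp_name : String), Dom_format_flat_macro rank components_list comp_name → Pre_format_flat_macro rank components_list comp_name → Spec_format_flat_macro rank components_list comp_name (format_flat_macro rank components_list comp_name)

-- ===== LEMMAS AND PROOFS =====

-- combo of index x: base-b digits of x, most significant first (last digit varies fastest)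
def pvCombo (cs : List (String × Int)) (b : Nat) : Nat → Nat → List (String × Int)
  | 0, _ => []
  | n + 1, x => pvCombo cs b n (x / b) ++ [cs.getD (x % b) ("", 0)]

theorem pvJoin_nil_chars (l : List (List Char)) : PySem.Chars.join [] l = l.flatten := by
  simp only [PySem.Chars.join]
  induction l with
  | nil => simp [List.intercalate]
  | cons a t ih => cases t <;> simp_all [List.intercalate, List.intersperse]

theorem pvJoin_append_singleton (l : List String) (s : String) :
    PySem.Str.join "" (l ++ [s]) = PySem.Str.join "" l ++ s := by
  simp only [PySem.Str.join, String.toList_empty, List.map_append, List.map_cons, List.map_nil,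
    pvJoin_nil_chars, List.flatten_append, List.flatten_cons, List.flatten_nil, List.append_nil]
  rw [String.ofList_append, String.ofList_toList]

theorem pvDecode_eq_combo (cs : List (String × Int)) (b n x : Nat) :
    pvDecode cs b n x =
      (PySem.Str.join "" ((pvCombo cs b n x).map Prod.fst), (pvCombo cs b n x).map Prod.snd) := by
  induction n generalizing x with
  | zero => simp [pvDecode, pvCombo]; rfl
  | succ n ih => simp [pvDecode, pvCombo, ih, pvJoin_append_singleton]

theorem pvProdRep_snoc (cs : List (String × Int)) (n : Nat) :
    pvProdRep cs (n + 1) = (pvProdRep cs n).flatMap (fun t => cs.map (fun c => t ++ [c])) := by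
  induction n with
  | zero => induction cs <;> simp_all [pvProdRep, List.flatMap]
  | succ n ih =>
    show cs.flatMap (fun c => (pvProdRep cs (n + 1)).map (fun t => c :: t)) =
      (cs.flatMap (fun c => (pvProdRep cs n).map (fun t => c :: t))).flatMap
        (fun t => cs.map (fun c => t ++ [c]))
    rw [ih]
    simp [List.flatMap_map, List.map_flatMap, List.flatMap_assoc, Function.comp_def]

theorem pvRange_mul (m b : Nat) :
    List.range (m * b) = (List.range m).flatMap (fun q => (List.range b).map (fun r => q * b + r)) := by
  induction m with
  | zero => simp
  | succ m ih =>
    rw [Nat.succ_mul, List.range_add, ih, List.range_succ, List.flatMap_append]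
    simp

theorem pvGetD_range {α : Type} (xs : List α) (d : α) :
    (List.range xs.length).map (fun r => xs.getD r d) = xs := by
  apply List.ext_getElem
  · simp
  · intro i h1 h2
    simp [List.getD, List.getElem?_eq_getElem h2]

theorem pvProdRep_eq_range (cs : List (String × Int)) (n : Nat) :
    pvProdRep cs n = (List.range (cs.length ^ n)).map (pvCombo cs cs.length n) := by
  induction n with
  | zero => simp [pvProdRep, pvCombo]
  | succ n ih =>
    rcases eq_or_ne cs [] with rfl | hcs
    · simp [pvProdRep]
    · have hb : 0 < cs.length := List.length_pos_of_ne_nil hcs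
      rw [pvProdRep_snoc, ih, pow_succ, pvRange_mul, List.map_flatMap, List.flatMap_map]
      apply List.flatMap_congr
      intro q _
      rw [List.map_map]
      have hmap : ∀ r ∈ List.range cs.length,
          (pvCombo cs cs.length (n + 1) ∘ fun r => q * cs.length + r) r =
            pvCombo cs cs.length n q ++ [cs.getD r ("", 0)] := by
        intro r hr
        have hrb : r < cs.length := List.mem_range.mp hr
        show pvCombo cs cs.length n ((q * cs.length + r) / cs.length) ++
            [cs.getD ((q * cs.length + r) % cs.length) ("", 0)] = _
        rw [Nat.add_comm, Nat.add_mul_div_right _ _ hb, Nat.div_eq_of_lt hrb, Nat.zero_add,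
            Nat.add_mul_mod_self_right, Nat.mod_eq_of_lt hrb]
      rw [List.map_congr_left hmap]
      conv_rhs =>
        rw [show (fun r => pvCombo cs cs.length n q ++ [cs.getD r ("", 0)]) =
            ((fun c => pvCombo cs cs.length n q ++ [c]) ∘ fun r => cs.getD r ("", 0)) from rfl,
          ← List.map_map, pvGetD_range]

set_option maxHeartbeats 1000000 in
theorem format_flat_macro_spec : Claim_equal_format_flat_macro := by
  intro rank cs cn _ hpre
  have h0 : 0 ≤ rank := hpre
  show format_flat_macro rank cs cn = format_flat_macro_alt rank cs cn
  unfold format_flat_macro format_flat_macro_alt pvSwizzles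
  simp only [PySem.List.foldl_append_singleton_eq_map, List.nil_append, List.map_map]
  rw [pvProdRep_eq_range, List.map_map]
  have hpad : ((4 : Int) - rank).toNat = max rank.toNat 4 - rank.toNat := by omega
  congr 2
  apply List.map_congr_left
  intro i _
  simp only [Function.comp, pvDecode_eq_combo, hpad]
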